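-- pv_equiv track=rewrite | github.com/Assay-Tools/assay | src/assay/reports/pdf.py | _post_process_html
-- ===== SOURCE A (Python) =====
-- def _post_process_html(html: str) -> str:
--     """Enhance the raw markdown-generated HTML for better PDF rendering."""
--     # Color-code rating cells
--     rating_colors = {
--         "Excellent": "score-excellent",
--         "Good": "score-good",
--         "Fair": "score-fair",
--         "Poor": "score-poor",
--         "N/A": "score-na",
--     }
--     for rating, css_class in rating_colors.items():
--         html = html.replace(
--             f"<td>{rating}</td>",
--             f'<td class="{css_class}">{rating}</td>',
--         )
--
--     return html
-- ===== SOURCE B (Python) =====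
-- _RATING_CELLS = [
--     ("<td>Excellent</td>", '<td class="score-excellent">Excellent</td>'),
--     ("<td>Good</td>", '<td class="score-good">Good</td>'),
--     ("<td>Fair</td>", '<td class="score-fair">Fair</td>'),
--     ("<td>Poor</td>", '<td class="score-poor">Poor</td>'),
--     ("<td>N/A</td>", '<td class="score-na">N/A</td>'),
-- ]
--
--
-- def _post_process_html(html: str) -> str:
--     """Enhance the raw markdown-generated HTML for better PDF rendering.
--
--     Single left-to-right scan: at each position, if one of the plain rating
--     cells starts here, emit its color-coded form and skip it; otherwise copy
--     one character.  One pass instead of five full-string replace passes.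
--     """
--     out = []
--     i = 0
--     n = len(html)
--     while i < n:
--         for cell, colored in _RATING_CELLS:
--             if html.startswith(cell, i):
--                 out.append(colored)
--                 i += len(cell)
--                 break
--         else:
--             out.append(html[i])
--             i += 1
--     return "".join(out)
-- ===== Notes on version B (the rewrite author's own statement) =====
-- stated objective: alternative
-- what changed: Replaces five sequential full-string str.replace passes by a single left-to-right scan that matches the five rating-cell literals at each position and emits the color-coded cell or copies one character.
import Mathlib
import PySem

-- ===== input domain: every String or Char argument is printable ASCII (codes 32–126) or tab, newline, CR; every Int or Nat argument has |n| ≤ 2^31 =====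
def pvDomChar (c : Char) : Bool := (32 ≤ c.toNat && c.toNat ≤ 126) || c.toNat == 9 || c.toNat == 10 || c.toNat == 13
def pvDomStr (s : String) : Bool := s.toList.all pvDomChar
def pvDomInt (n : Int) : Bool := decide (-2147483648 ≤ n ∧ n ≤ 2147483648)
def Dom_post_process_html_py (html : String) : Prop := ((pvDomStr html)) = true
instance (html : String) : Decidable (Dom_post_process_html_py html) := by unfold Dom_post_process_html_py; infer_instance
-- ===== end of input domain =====

-- B replaces A's five sequential full-string replace passes by one left-to-right scan
-- that emits the color-coded cell at each match position (objective: alternative).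

-- ===== PORT A =====
def post_process_html_py (html : String) : String :=
  let rating_colors : PySem.Dict String String :=
    (((((PySem.Dict.empty).insert "Excellent" "score-excellent").insert "Good" "score-good").insert
          "Fair" "score-fair").insert "Poor" "score-poor").insert "N/A" "score-na"
  rating_colors.items.foldl
    (fun h rc =>
      PySem.Str.replace h ("<td>" ++ rc.1 ++ "</td>")
        ("<td class=\"" ++ rc.2 ++ "\">" ++ rc.1 ++ "</td>"))
    html

-- ===== PORT B =====
def pvCell1 : List Char := "<td>Excellent</td>".toList
def pvCell2 : List Char := "<td>Good</td>".toList
def pvCell3 : List Char := "<td>Fair</td>".toList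
def pvCell4 : List Char := "<td>Poor</td>".toList
def pvCell5 : List Char := "<td>N/A</td>".toList
def pvOut1 : List Char := "<td class=\"score-excellent\">Excellent</td>".toList
def pvOut2 : List Char := "<td class=\"score-good\">Good</td>".toList
def pvOut3 : List Char := "<td class=\"score-fair\">Fair</td>".toList
def pvOut4 : List Char := "<td class=\"score-poor\">Poor</td>".toList
def pvOut5 : List Char := "<td class=\"score-na\">N/A</td>".toList

-- the single left-to-right scan of Source B's while-loop (the inner for-loop unrolled)
def pvScan : List Char → List Char
  | [] => []
  | c :: t =>
    if pvCell1.isPrefixOf (c :: t) then pvOut1 ++ pvScan (t.drop 17)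
    else if pvCell2.isPrefixOf (c :: t) then pvOut2 ++ pvScan (t.drop 12)
    else if pvCell3.isPrefixOf (c :: t) then pvOut3 ++ pvScan (t.drop 12)
    else if pvCell4.isPrefixOf (c :: t) then pvOut4 ++ pvScan (t.drop 12)
    else if pvCell5.isPrefixOf (c :: t) then pvOut5 ++ pvScan (t.drop 11)
    else c :: pvScan t
termination_by l => l.length
decreasing_by all_goals simp [List.length_drop] <;> omega

def post_process_html_py_alt (html : String) : String :=
  String.ofList (pvScan html.toList)

-- ===== PRECONDITION & SPEC =====
def Spec_post_process_html_py (html : String) (out : String) : Prop := out = post_process_html_py_alt html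
instance (html : String) (out : String) : Decidable (Spec_post_process_html_py html out) := by unfold Spec_post_process_html_py; infer_instance

-- ===== CLAIM (what is proved, stated in full; the proofs are below) =====
def Claim_equal_post_process_html_py : Prop := ∀ (html : String), Dom_post_process_html_py html → Spec_post_process_html_py html (post_process_html_py html)

-- ===== LEMMAS AND PROOFS =====

-- A's composition of the five replace passes, on the character-list side
def pvChain (l : List Char) : List Char :=
  PySem.Chars.replace
    (PySem.Chars.replace
      (PySem.Chars.replace
        (PySem.Chars.replace
          (PySem.Chars.replace l pvCell1 pvOut1) pvCell2 pvOut2) pvCell3 pvOut3) pvCell4 pvOut4)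
    pvCell5 pvOut5

lemma pvReplace_eq_go (old new : List Char) (h : old ≠ []) (l : List Char) :
    PySem.Chars.replace l old new = PySem.Chars.replace.go old new l.length l [] := by
  rw [PySem.Chars.replace]
  simp [List.isEmpty_eq_false_iff.mpr h]

lemma pvGo_zero (old new acc l : List Char) :
    PySem.Chars.replace.go old new 0 l acc = acc.reverse ++ l := by
  rw [PySem.Chars.replace.go]

lemma pvGo_nil (old new acc : List Char) (f : Nat) :
    PySem.Chars.replace.go old new (f+1) [] acc = acc.reverse := by
  rw [PySem.Chars.replace.go]; omega

lemma pvGo_cons (old new : List Char) (c : Char) (t acc : List Char) (f : Nat) :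
    PySem.Chars.replace.go old new (f+1) (c::t) acc =
      if old.isPrefixOf (c::t) = true then
        PySem.Chars.replace.go old new f (List.drop old.length (c::t)) (new.reverse ++ acc)
      else PySem.Chars.replace.go old new f t (c :: acc) := by
  rw [PySem.Chars.replace.go]

lemma pvGo_acc (old new : List Char) :
    ∀ (fuel : Nat) (l acc : List Char),
      PySem.Chars.replace.go old new fuel l acc = acc.reverse ++ PySem.Chars.replace.go old new fuel l [] := by
  intro fuel
  induction fuel with
  | zero => intro l acc; simp [pvGo_zero]
  | succ f ih =>
    intro l acc
    cases l with
    | nil => simp [pvGo_nil]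
    | cons c t =>
      rw [pvGo_cons, pvGo_cons]
      split
      · rw [ih _ (new.reverse ++ acc), ih _ (new.reverse ++ [])]
        simp
      · rw [ih _ (c :: acc), ih _ [c]]
        simp

lemma pvGo_fuel (old new : List Char) (hold : 1 ≤ old.length) :
    ∀ (fuel : Nat) (l : List Char), l.length ≤ fuel →
      PySem.Chars.replace.go old new fuel l [] = PySem.Chars.replace.go old new l.length l [] := by
  intro fuel
  induction fuel using Nat.strong_induction_on with
  | _ fuel ih =>
    intro l hl
    cases l with
    | nil =>
      cases fuel with
      | zero => rfl
      | succ f =>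
        rw [pvGo_nil, show ([] : List Char).length = 0 from rfl, pvGo_zero]
        rfl
    | cons c t =>
      cases fuel with
      | zero => simp at hl
      | succ f =>
        have hf : t.length ≤ f := by simp at hl; omega
        rw [show (c::t).length = t.length + 1 from by simp, pvGo_cons, pvGo_cons]
        split
        · have hdl : (List.drop old.length (c::t)).length ≤ t.length := by
            simp [List.length_drop]; omega
          rw [pvGo_acc, pvGo_acc old new t.length]
          rw [ih f (by omega) _ (le_trans hdl hf),
              ih t.length (by omega) _ hdl]
        · rw [pvGo_acc, pvGo_acc old new t.length]
          rw [ih f (by omega) t hf, ih t.length (by omega) t le_rfl]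

lemma pvReplace_nil (old new : List Char) (h : old ≠ []) :
    PySem.Chars.replace [] old new = [] := by
  rw [pvReplace_eq_go old new h]
  simp [pvGo_zero]

lemma pvReplace_cons (old new : List Char) (h : old ≠ []) (c : Char) (t : List Char) :
    PySem.Chars.replace (c::t) old new =
      if old.isPrefixOf (c::t) = true then
        new ++ PySem.Chars.replace (List.drop old.length (c::t)) old new
      else c :: PySem.Chars.replace t old new := by
  have hone : 1 ≤ old.length := by
    cases old with
    | nil => exact absurd rfl h
    | cons _ _ => simp
  rw [pvReplace_eq_go old new h]
  rw [show (c::t).length = t.length + 1 from by simp, pvGo_cons]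
  split
  · rw [pvGo_acc, pvGo_fuel old new hone t.length _ (by simp [List.length_drop]; omega)]
    rw [← pvReplace_eq_go old new h]
    simp
  · rw [pvGo_acc, pvGo_fuel old new hone t.length t le_rfl, ← pvReplace_eq_go old new h]
    simp

-- mismatch inside the overlap of two strings
def pvMism : List Char → List Char → Bool
  | a :: s, b :: p => a != b || pvMism s p
  | _, _ => false

lemma pvMism_not_prefix : ∀ (s p b : List Char), pvMism s p = true → ¬ p <+: (s ++ b) := by
  intro s
  induction s with
  | nil => intro p b h; simp [pvMism] at h
  | cons a s ih =>
    intro p b h hpre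
    cases p with
    | nil => simp [pvMism] at h
    | cons x q =>
      rw [List.cons_append, List.cons_prefix_cons] at hpre
      simp [pvMism] at h
      rcases h with h | h
      · exact h hpre.1.symm
      · exact ih q b h hpre.2

lemma pvMism_comm : ∀ (s p : List Char), pvMism s p = pvMism p s := by
  intro s
  induction s with
  | nil => intro p; cases p <;> simp [pvMism]
  | cons a s ih =>
    intro p
    cases p with
    | nil => simp [pvMism]
    | cons b q => simp [pvMism, ih q, bne_comm]

-- a replace pass walks unchanged through a region `a` in which the pattern occurs nowhere
lemma pvPass (p r : List Char) (hp : p ≠ []) :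
    ∀ (a b : List Char), (∀ i, i < a.length → pvMism (List.drop i a) p = true) →
      PySem.Chars.replace (a ++ b) p r = a ++ PySem.Chars.replace b p r := by
  intro a
  induction a with
  | nil => intro b _; simp
  | cons c t ih =>
    intro b H
    rw [List.cons_append, pvReplace_cons p r hp]
    have hnp : ¬ p <+: ((c :: t) ++ b) := pvMism_not_prefix (c :: t) p b (by simpa using H 0 (by simp))
    rw [if_neg (by simpa [List.isPrefixOf_iff_prefix, List.cons_append] using hnp)]
    rw [ih b (fun i hi => by simpa using H (i+1) (by simpa using Nat.succ_lt_succ hi))]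
    rfl

-- a replace pass fires on an occurrence of its pattern at the front
lemma pvMatch (p r b : List Char) (hp : p ≠ []) :
    PySem.Chars.replace (p ++ b) p r = r ++ PySem.Chars.replace b p r := by
  cases p with
  | nil => exact absurd rfl hp
  | cons c t =>
    rw [List.cons_append, pvReplace_cons (c::t) r hp]
    rw [if_pos (by
      rw [List.isPrefixOf_iff_prefix, ← List.cons_append]
      exact List.prefix_append _ _)]
    rw [← List.cons_append, List.drop_left' (by simp)]

-- a replace pass never creates an occurrence of a suffix of u (every suffix of u mismatches r)
lemma pvNoCreate (p r u : List Char) (hp : p ≠ [])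
    (H : ∀ k, k < u.length → pvMism (List.drop k u) r = true) :
    ∀ (t : List Char) (k : Nat),
      List.drop k u <+: PySem.Chars.replace t p r → List.drop k u <+: t := by
  intro t
  induction t with
  | nil =>
    intro k h
    rw [pvReplace_nil p r hp] at h
    rw [List.prefix_nil.mp h]
  | cons c t ih =>
    intro k h
    by_cases hk : k < u.length
    · rw [pvReplace_cons p r hp] at h
      split at h
      · exfalso
        have hm : pvMism r (List.drop k u) = true := by
          rw [pvMism_comm]; exact H k hk
        exact pvMism_not_prefix r (List.drop k u) _ hm h
      · rw [List.drop_eq_getElem_cons hk] at h ⊢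
        rw [List.cons_prefix_cons] at h ⊢
        refine ⟨h.1, ?_⟩
        by_cases hk1 : k + 1 < u.length
        · exact ih (k+1) h.2
        · rw [List.drop_eq_nil_of_le (by omega)]
          exact List.nil_prefix
    · rw [List.drop_eq_nil_of_le (by omega)] at h ⊢
      exact List.nil_prefix

-- a replace pass over a tail cannot make pattern u appear at the head position
lemma pvLift (p r u : List Char) (hp : p ≠ []) (hu : u ≠ [])
    (H : ∀ k, k < u.length → pvMism (List.drop k u) r = true)
    (c : Char) (t : List Char) (hn : ¬ u <+: (c::t)) :
    ¬ u <+: (c :: PySem.Chars.replace t p r) := by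
  intro hpre
  have hul : 0 < u.length := List.length_pos_of_ne_nil hu
  have hcons : u = u[0] :: List.drop 1 u := by
    simpa using List.drop_eq_getElem_cons (l := u) (i := 0) hul
  rw [hcons, List.cons_prefix_cons] at hpre
  exact hn (by
    rw [hcons, List.cons_prefix_cons]
    exact ⟨hpre.1, pvNoCreate p r u hp H t 1 hpre.2⟩)

-- a replace pass copies a head character that starts no occurrence of the pattern
lemma pvStep (p r : List Char) (hp : p ≠ []) (c : Char) (Y : List Char) (h : ¬ p <+: (c::Y)) :
    PySem.Chars.replace (c::Y) p r = c :: PySem.Chars.replace Y p r := by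
  rw [pvReplace_cons p r hp]
  rw [if_neg (by simpa [List.isPrefixOf_iff_prefix] using h)]

-- chain unfolding lemmas -------------------------------------------------

lemma pvChain_nil : pvChain [] = [] := by
  unfold pvChain
  rw [pvReplace_nil pvCell1 pvOut1 (by decide), pvReplace_nil pvCell2 pvOut2 (by decide),
      pvReplace_nil pvCell3 pvOut3 (by decide), pvReplace_nil pvCell4 pvOut4 (by decide),
      pvReplace_nil pvCell5 pvOut5 (by decide)]

lemma pvChain_match1 (x : List Char) : pvChain (pvCell1 ++ x) = pvOut1 ++ pvChain x := by
  unfold pvChain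
  rw [pvMatch pvCell1 pvOut1 x (by decide),
      pvPass pvCell2 pvOut2 (by decide) pvOut1 _ (by decide),
      pvPass pvCell3 pvOut3 (by decide) pvOut1 _ (by decide),
      pvPass pvCell4 pvOut4 (by decide) pvOut1 _ (by decide),
      pvPass pvCell5 pvOut5 (by decide) pvOut1 _ (by decide)]

lemma pvChain_match2 (x : List Char) : pvChain (pvCell2 ++ x) = pvOut2 ++ pvChain x := by
  unfold pvChain
  rw [pvPass pvCell1 pvOut1 (by decide) pvCell2 x (by decide),
      pvMatch pvCell2 pvOut2 _ (by decide),
      pvPass pvCell3 pvOut3 (by decide) pvOut2 _ (by decide),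
      pvPass pvCell4 pvOut4 (by decide) pvOut2 _ (by decide),
      pvPass pvCell5 pvOut5 (by decide) pvOut2 _ (by decide)]

lemma pvChain_match3 (x : List Char) : pvChain (pvCell3 ++ x) = pvOut3 ++ pvChain x := by
  unfold pvChain
  rw [pvPass pvCell1 pvOut1 (by decide) pvCell3 x (by decide),
      pvPass pvCell2 pvOut2 (by decide) pvCell3 _ (by decide),
      pvMatch pvCell3 pvOut3 _ (by decide),
      pvPass pvCell4 pvOut4 (by decide) pvOut3 _ (by decide),
      pvPass pvCell5 pvOut5 (by decide) pvOut3 _ (by decide)]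

lemma pvChain_match4 (x : List Char) : pvChain (pvCell4 ++ x) = pvOut4 ++ pvChain x := by
  unfold pvChain
  rw [pvPass pvCell1 pvOut1 (by decide) pvCell4 x (by decide),
      pvPass pvCell2 pvOut2 (by decide) pvCell4 _ (by decide),
      pvPass pvCell3 pvOut3 (by decide) pvCell4 _ (by decide),
      pvMatch pvCell4 pvOut4 _ (by decide),
      pvPass pvCell5 pvOut5 (by decide) pvOut4 _ (by decide)]

lemma pvChain_match5 (x : List Char) : pvChain (pvCell5 ++ x) = pvOut5 ++ pvChain x := by
  unfold pvChain
  rw [pvPass pvCell1 pvOut1 (by decide) pvCell5 x (by decide),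
      pvPass pvCell2 pvOut2 (by decide) pvCell5 _ (by decide),
      pvPass pvCell3 pvOut3 (by decide) pvCell5 _ (by decide),
      pvPass pvCell4 pvOut4 (by decide) pvCell5 _ (by decide),
      pvMatch pvCell5 pvOut5 _ (by decide)]

lemma pvChain_nomatch (c : Char) (t : List Char)
    (h1 : ¬ pvCell1 <+: (c::t)) (h2 : ¬ pvCell2 <+: (c::t)) (h3 : ¬ pvCell3 <+: (c::t))
    (h4 : ¬ pvCell4 <+: (c::t)) (h5 : ¬ pvCell5 <+: (c::t)) :
    pvChain (c::t) = c :: pvChain t := by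
  have g2 := pvLift pvCell1 pvOut1 pvCell2 (by decide) (by decide) (by decide) c t h2
  have g3a := pvLift pvCell1 pvOut1 pvCell3 (by decide) (by decide) (by decide) c t h3
  have g3 := pvLift pvCell2 pvOut2 pvCell3 (by decide) (by decide) (by decide) c _ g3a
  have g4a := pvLift pvCell1 pvOut1 pvCell4 (by decide) (by decide) (by decide) c t h4
  have g4b := pvLift pvCell2 pvOut2 pvCell4 (by decide) (by decide) (by decide) c _ g4a
  have g4 := pvLift pvCell3 pvOut3 pvCell4 (by decide) (by decide) (by decide) c _ g4b
  have g5a := pvLift pvCell1 pvOut1 pvCell5 (by decide) (by decide) (by decide) c t h5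
  have g5b := pvLift pvCell2 pvOut2 pvCell5 (by decide) (by decide) (by decide) c _ g5a
  have g5c := pvLift pvCell3 pvOut3 pvCell5 (by decide) (by decide) (by decide) c _ g5b
  have g5 := pvLift pvCell4 pvOut4 pvCell5 (by decide) (by decide) (by decide) c _ g5c
  unfold pvChain
  rw [pvStep pvCell1 pvOut1 (by decide) c t h1,
      pvStep pvCell2 pvOut2 (by decide) c _ g2,
      pvStep pvCell3 pvOut3 (by decide) c _ g3,
      pvStep pvCell4 pvOut4 (by decide) c _ g4,
      pvStep pvCell5 pvOut5 (by decide) c _ g5]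

-- pvScan unfolding lemmas ------------------------------------------------

lemma pvScan_match1 (x : List Char) : pvScan (pvCell1 ++ x) = pvOut1 ++ pvScan x := by
  rw [show pvCell1 ++ x = '<' :: ("td>Excellent</td>".toList ++ x) from rfl, pvScan]
  rw [if_pos (by
    rw [List.isPrefixOf_iff_prefix,
        show '<' :: ("td>Excellent</td>".toList ++ x) = pvCell1 ++ x from rfl]
    exact List.prefix_append _ _)]
  rw [List.drop_left' (by decide)]

lemma pvScan_match2 (x : List Char) : pvScan (pvCell2 ++ x) = pvOut2 ++ pvScan x := by
  have e : '<' :: ("td>Good</td>".toList ++ x) = pvCell2 ++ x := rfl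
  rw [show pvCell2 ++ x = '<' :: ("td>Good</td>".toList ++ x) from rfl, pvScan]
  rw [if_neg (by
    rw [List.isPrefixOf_iff_prefix, e]
    exact pvMism_not_prefix pvCell2 pvCell1 x (by decide))]
  rw [if_pos (by rw [List.isPrefixOf_iff_prefix, e]; exact List.prefix_append _ _)]
  rw [List.drop_left' (by decide)]

lemma pvScan_match3 (x : List Char) : pvScan (pvCell3 ++ x) = pvOut3 ++ pvScan x := by
  have e : '<' :: ("td>Fair</td>".toList ++ x) = pvCell3 ++ x := rfl
  rw [show pvCell3 ++ x = '<' :: ("td>Fair</td>".toList ++ x) from rfl, pvScan]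
  rw [if_neg (by
    rw [List.isPrefixOf_iff_prefix, e]
    exact pvMism_not_prefix pvCell3 pvCell1 x (by decide))]
  rw [if_neg (by
    rw [List.isPrefixOf_iff_prefix, e]
    exact pvMism_not_prefix pvCell3 pvCell2 x (by decide))]
  rw [if_pos (by rw [List.isPrefixOf_iff_prefix, e]; exact List.prefix_append _ _)]
  rw [List.drop_left' (by decide)]

lemma pvScan_match4 (x : List Char) : pvScan (pvCell4 ++ x) = pvOut4 ++ pvScan x := by
  have e : '<' :: ("td>Poor</td>".toList ++ x) = pvCell4 ++ x := rfl
  rw [show pvCell4 ++ x = '<' :: ("td>Poor</td>".toList ++ x) from rfl, pvScan]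
  rw [if_neg (by
    rw [List.isPrefixOf_iff_prefix, e]
    exact pvMism_not_prefix pvCell4 pvCell1 x (by decide))]
  rw [if_neg (by
    rw [List.isPrefixOf_iff_prefix, e]
    exact pvMism_not_prefix pvCell4 pvCell2 x (by decide))]
  rw [if_neg (by
    rw [List.isPrefixOf_iff_prefix, e]
    exact pvMism_not_prefix pvCell4 pvCell3 x (by decide))]
  rw [if_pos (by rw [List.isPrefixOf_iff_prefix, e]; exact List.prefix_append _ _)]
  rw [List.drop_left' (by decide)]

lemma pvScan_match5 (x : List Char) : pvScan (pvCell5 ++ x) = pvOut5 ++ pvScan x := by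
  have e : '<' :: ("td>N/A</td>".toList ++ x) = pvCell5 ++ x := rfl
  rw [show pvCell5 ++ x = '<' :: ("td>N/A</td>".toList ++ x) from rfl, pvScan]
  rw [if_neg (by
    rw [List.isPrefixOf_iff_prefix, e]
    exact pvMism_not_prefix pvCell5 pvCell1 x (by decide))]
  rw [if_neg (by
    rw [List.isPrefixOf_iff_prefix, e]
    exact pvMism_not_prefix pvCell5 pvCell2 x (by decide))]
  rw [if_neg (by
    rw [List.isPrefixOf_iff_prefix, e]
    exact pvMism_not_prefix pvCell5 pvCell3 x (by decide))]
  rw [if_neg (by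
    rw [List.isPrefixOf_iff_prefix, e]
    exact pvMism_not_prefix pvCell5 pvCell4 x (by decide))]
  rw [if_pos (by rw [List.isPrefixOf_iff_prefix, e]; exact List.prefix_append _ _)]
  rw [List.drop_left' (by decide)]

lemma pvScan_nomatch (c : Char) (t : List Char)
    (h1 : ¬ pvCell1 <+: (c::t)) (h2 : ¬ pvCell2 <+: (c::t)) (h3 : ¬ pvCell3 <+: (c::t))
    (h4 : ¬ pvCell4 <+: (c::t)) (h5 : ¬ pvCell5 <+: (c::t)) :
    pvScan (c::t) = c :: pvScan t := by
  rw [pvScan]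
  rw [if_neg (by simpa [List.isPrefixOf_iff_prefix] using h1),
      if_neg (by simpa [List.isPrefixOf_iff_prefix] using h2),
      if_neg (by simpa [List.isPrefixOf_iff_prefix] using h3),
      if_neg (by simpa [List.isPrefixOf_iff_prefix] using h4),
      if_neg (by simpa [List.isPrefixOf_iff_prefix] using h5)]

-- the main equivalence on character lists --------------------------------

lemma pvMain : ∀ (n : Nat) (l : List Char), l.length ≤ n → pvChain l = pvScan l := by
  intro n
  induction n with
  | zero =>
    intro l hl
    rw [List.eq_nil_of_length_eq_zero (Nat.le_zero.mp hl), pvChain_nil, pvScan]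
  | succ n ih =>
    intro l hl
    cases l with
    | nil => rw [pvChain_nil, pvScan]
    | cons c t =>
      by_cases h1 : pvCell1 <+: (c::t)
      · obtain ⟨x, hx⟩ := h1
        have hlen : x.length ≤ n := by
          have := congrArg List.length hx
          simp [pvCell1] at this
          simp at hl; omega
        rw [← hx, pvChain_match1, pvScan_match1, ih x hlen]
      · by_cases h2 : pvCell2 <+: (c::t)
        · obtain ⟨x, hx⟩ := h2
          have hlen : x.length ≤ n := by
            have := congrArg List.length hx
            simp [pvCell2] at this
            simp at hl; omega
          rw [← hx, pvChain_match2, pvScan_match2, ih x hlen]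
        · by_cases h3 : pvCell3 <+: (c::t)
          · obtain ⟨x, hx⟩ := h3
            have hlen : x.length ≤ n := by
              have := congrArg List.length hx
              simp [pvCell3] at this
              simp at hl; omega
            rw [← hx, pvChain_match3, pvScan_match3, ih x hlen]
          · by_cases h4 : pvCell4 <+: (c::t)
            · obtain ⟨x, hx⟩ := h4
              have hlen : x.length ≤ n := by
                have := congrArg List.length hx
                simp [pvCell4] at this
                simp at hl; omega
              rw [← hx, pvChain_match4, pvScan_match4, ih x hlen]
            · by_cases h5 : pvCell5 <+: (c::t)
              · obtain ⟨x, hx⟩ := h5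
                have hlen : x.length ≤ n := by
                  have := congrArg List.length hx
                  simp [pvCell5] at this
                  simp at hl; omega
                rw [← hx, pvChain_match5, pvScan_match5, ih x hlen]
              · rw [pvChain_nomatch c t h1 h2 h3 h4 h5, pvScan_nomatch c t h1 h2 h3 h4 h5,
                    ih t (by simp at hl; omega)]

-- bridging A's String-level port to pvChain
lemma pvA_eq (html : String) :
    post_process_html_py html = String.ofList (pvChain html.toList) := by
  unfold post_process_html_py
  have hitems : ((((((PySem.Dict.empty).insert "Excellent" "score-excellent").insert "Good" "score-good").insert
          "Fair" "score-fair").insert "Poor" "score-poor").insert "N/A" "score-na" : PySem.Dict String String).items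
      = [("Excellent","score-excellent"),("Good","score-good"),("Fair","score-fair"),("Poor","score-poor"),("N/A","score-na")] := by decide
  simp only [hitems, List.foldl]
  simp only [PySem.Str.replace, String.toList_ofList]
  congr 1

-- ===== VERDICT (by name: the statement is the Claim_ definition above) =====
theorem post_process_html_py_spec : Claim_equal_post_process_html_py := by
  intro html _
  unfold Spec_post_process_html_py
  rw [pvA_eq]
  unfold post_process_html_py_alt
  exact congrArg String.ofList (pvMain html.toList.length html.toList le_rfl)
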